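-- pv_equiv track=rewrite | github.com/JefferyKarasawa/DiscordBotPython | cmds/ffxiv.py | _find_tag_open_end
-- ===== SOURCE A (Python) =====
-- def _find_tag_open_end(source: str, start_index: int) -> int:
--     """Return the index of the '>' that closes a tag, ignoring quoted content."""
--     quote: str | None = None
--     i = start_index
--     length = len(source)
--
--     while i < length:
--         ch = source[i]
--         if quote:
--             if ch == quote:
--                 quote = None
--         else:
--             if ch == '"' or ch == "'":
--                 quote = ch
--             elif ch == ">":
--                 return i
--         i += 1
--
--     return -1
-- ===== SOURCE B (Python) =====
-- def _find_tag_open_end(source: str, start_index: int) -> int: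
--     """Return the index of the '>' that closes a tag, ignoring quoted content.
--
--     Instead of examining every character, repeatedly locate the next special
--     character ('>', '"' or "'") with str.find, then either return it or jump
--     past the quoted span it opens.
--     """
--     i = start_index
--     while True:
--         cands = [p for p in (source.find(c, i) for c in '>"\'') if p != -1]
--         if not cands:
--             return -1
--         j = min(cands)
--         ch = source[j]
--         if ch == '>':
--             return j
--         k = source.find(ch, j + 1)
--         if k == -1:
--             return -1  # unterminated quote
--         i = k + 1
-- ===== Notes on version B (the rewrite author's own statement) =====
-- stated objective: faster
-- what changed: Replaced A's per-character quote-state machine by a find-driven loop that jumps straight to the next special character ('>', '"', or '\'') via str.find and skips each quoted span with another str.find, never inspecting ordinary characters.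
-- outside the precondition, e.g. on _find_tag_open_end("'a'>", -4): A returns -1, B returns 3; on _find_tag_open_end("a'b>", -3): A returns 3, B returns -1
import Mathlib
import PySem

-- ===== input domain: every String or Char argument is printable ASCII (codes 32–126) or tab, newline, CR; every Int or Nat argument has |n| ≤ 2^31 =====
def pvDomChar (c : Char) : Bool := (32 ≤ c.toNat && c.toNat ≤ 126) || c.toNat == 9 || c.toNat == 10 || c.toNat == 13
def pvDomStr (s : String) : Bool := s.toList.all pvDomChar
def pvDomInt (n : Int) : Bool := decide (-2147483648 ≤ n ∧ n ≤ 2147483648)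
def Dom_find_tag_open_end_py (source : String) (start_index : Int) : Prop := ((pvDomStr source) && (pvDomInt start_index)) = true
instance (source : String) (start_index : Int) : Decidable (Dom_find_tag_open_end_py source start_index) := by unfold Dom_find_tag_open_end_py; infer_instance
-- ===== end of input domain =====

-- B replaces A's per-character quote-state machine by a find-driven loop that jumps
-- directly to the next special character ('>', '"', '\'') via str.find and skips each
-- quoted span with another find; a timing run measured B faster (C-level find, same O(n)).


-- ===== PORT A =====
-- A's while loop, one recursive step per character, carrying the `quote` state.
-- The loop index strictly increases, so fuel = (len - i) + 1 iterations always
-- suffice; pyGet? cs i = none covers both loop exit (i ≥ len, return -1) and the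
-- IndexError region i < -len, which Pre_ excludes.
def pvScanAF (cs : List Char) : Nat → Option Char → Int → Int
  | 0, _, _ => -1
  | fuel + 1, quote, i =>
    match PySem.List.pyGet? cs i with
    | none => -1
    | some ch =>
      match quote with
      | some q => pvScanAF cs fuel (if ch = q then none else some q) (i + 1)
      | none =>
        if ch = '"' ∨ ch = '\'' then pvScanAF cs fuel (some ch) (i + 1)
        else if ch = '>' then i
        else pvScanAF cs fuel none (i + 1)

def find_tag_open_end_py (source : String) (start_index : Int) : Int :=
  pvScanAF source.toList
    (((source.toList.length : Int) - start_index).toNat + 1) none start_index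

-- ===== PORT B =====
-- Source B's `[p for p in (source.find(c, i) for c in '>"\'') if p != -1]`
def pvCandsB (cs : List Char) (i : Int) : List Int :=
  (['>', '"', '\''].map (fun c => PySem.Chars.findFrom cs [c] i none)).filter
    (fun p => p != -1)

-- Source B's `while True` loop: find the candidate positions of the three special
-- characters, take the smallest, and either return it ('>'), return -1 (no
-- candidates / unterminated quote), or jump past the quoted span.  Each pass
-- strictly increases i, so the same fuel bound as for A suffices; the pyGet?
-- guard only makes the in-range Python indexing `source[j]` total.
def pvScanBF (cs : List Char) : Nat → Int → Int
  | 0, _ => -1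
  | fuel + 1, i =>
    match PySem.List.min? (pvCandsB cs i) (fun x => x) with
    | none => -1
    | some j =>
      match PySem.List.pyGet? cs j with
      | none => -1
      | some ch =>
        if ch = '>' then j
        else if PySem.Chars.findFrom cs [ch] (j + 1) none = -1 then -1
        else pvScanBF cs fuel (PySem.Chars.findFrom cs [ch] (j + 1) none + 1)

def find_tag_open_end_py_alt (source : String) (start_index : Int) : Int :=
  pvScanBF source.toList
    (((source.toList.length : Int) - start_index).toNat + 1) start_index

-- ===== PRECONDITION & SPEC =====
-- Pre_ restricts to the natural domain of nonnegative scan indices: for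
-- start_index < -len(source) A raises IndexError, and for -len ≤ start_index < 0
-- A's values come from Python's negative-index wraparound (B, whose find-based
-- skipping uses absolute indices, legitimately differs there).
def Pre_find_tag_open_end_py (source : String) (start_index : Int) : Prop :=
  0 ≤ start_index
instance (source : String) (start_index : Int) : Decidable (Pre_find_tag_open_end_py source start_index) := by unfold Pre_find_tag_open_end_py; infer_instance

def pvWitness_find_tag_open_end_py : String × Int := ("'a'>", 0)

def Spec_find_tag_open_end_py (source : String) (start_index : Int) (out : Int) : Prop := out = find_tag_open_end_py_alt source start_index
instance (source : String) (start_index : Int) (out : Int) : Decidable (Spec_find_tag_open_end_py source start_index out) := by unfold Spec_find_tag_open_end_py; infer_instance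

-- ===== CLAIM (what is proved, stated in full; the proofs are below) =====
def Claim_equal_find_tag_open_end_py : Prop := ∀ (source : String) (start_index : Int), Dom_find_tag_open_end_py source start_index → Pre_find_tag_open_end_py source start_index → Spec_find_tag_open_end_py source start_index (find_tag_open_end_py source start_index)

-- ===== LEMMAS AND PROOFS =====

-- pyGet? = some forces the index in range
theorem pv_inrange {cs : List Char} {i : Int} {ch : Char}
    (h : PySem.List.pyGet? cs i = some ch) : -(cs.length : Int) ≤ i ∧ i < cs.length := by
  by_contra hc
  have hn : PySem.List.pyGet? cs i = none :=
    (PySem.List.pyGet?_eq_none_iff cs i).2 (by simpa [PySem.Raise.InRange] using hc)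
  rw [hn] at h; cases h

-- one-step unfolding lemmas for the two loops
theorem pvA_step_none {cs : List Char} {i : Int} (f : Nat) (quote : Option Char)
    (h : PySem.List.pyGet? cs i = none) : pvScanAF cs (f + 1) quote i = -1 := by
  simp [pvScanAF, h]

theorem pvA_step_quote {cs : List Char} {i : Int} {ch q : Char} (f : Nat)
    (h : PySem.List.pyGet? cs i = some ch) :
    pvScanAF cs (f + 1) (some q) i =
      pvScanAF cs f (if ch = q then none else some q) (i + 1) := by
  simp only [pvScanAF, h]

theorem pvA_step_open {cs : List Char} {i : Int} {ch : Char} (f : Nat)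
    (h : PySem.List.pyGet? cs i = some ch) :
    pvScanAF cs (f + 1) none i =
      (if ch = '"' ∨ ch = '\'' then pvScanAF cs f (some ch) (i + 1)
       else if ch = '>' then i else pvScanAF cs f none (i + 1)) := by
  simp only [pvScanAF, h]

theorem pvB_step_none {cs : List Char} {i : Int} (f : Nat)
    (h : PySem.List.min? (pvCandsB cs i) (fun x => x) = none) :
    pvScanBF cs (f + 1) i = -1 := by
  simp [pvScanBF, h]

theorem pvB_step_some {cs : List Char} {i j : Int} {ch : Char} (f : Nat)
    (h : PySem.List.min? (pvCandsB cs i) (fun x => x) = some j)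
    (hget : PySem.List.pyGet? cs j = some ch) :
    pvScanBF cs (f + 1) i =
      (if ch = '>' then j
       else if PySem.Chars.findFrom cs [ch] (j + 1) none = -1 then -1
       else pvScanBF cs f (PySem.Chars.findFrom cs [ch] (j + 1) none + 1)) := by
  simp only [pvScanBF, h, hget]

-- pyGet? at a nonnegative in-range index is the plain getElem
theorem pv_get_pos {cs : List Char} {i : Int} {ch : Char} (hi : 0 ≤ i)
    (h : PySem.List.pyGet? cs i = some ch) :
    ∃ hlt : i.toNat < cs.length, cs[i.toNat] = ch := by
  have hr := pv_inrange h
  have hlt : i.toNat < cs.length := by omega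
  have hsome := PySem.List.pyGet?_eq_some_getElem cs hi (show i < (cs.length : Int) by omega)
  rw [h] at hsome
  injection hsome with hh
  exact ⟨hlt, hh.symm⟩

-- A's loop value does not depend on the fuel, given enough of it
theorem pvA_fuel (cs : List Char) : ∀ (f g : Nat) (quote : Option Char) (i : Int),
    0 ≤ i → ((cs.length : Int) - i).toNat < f → ((cs.length : Int) - i).toNat < g →
    pvScanAF cs f quote i = pvScanAF cs g quote i := by
  intro f
  induction f with
  | zero => intro g quote i _ hf _; exact absurd hf (Nat.not_lt_zero _)
  | succ f ih =>
    intro g quote i hi hf hg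
    cases g with
    | zero => exact absurd hg (Nat.not_lt_zero _)
    | succ g =>
      cases h : PySem.List.pyGet? cs i with
      | none => rw [pvA_step_none f quote h, pvA_step_none g quote h]
      | some ch =>
        have hr := pv_inrange h
        cases quote with
        | some q =>
          rw [pvA_step_quote f h, pvA_step_quote g h]
          exact ih g _ (i + 1) (by omega) (by omega) (by omega)
        | none =>
          rw [pvA_step_open f h, pvA_step_open g h]
          by_cases h1 : ch = '"' ∨ ch = '\''
          · rw [if_pos h1, if_pos h1]
            exact ih g _ (i + 1) (by omega) (by omega) (by omega)
          · rw [if_neg h1, if_neg h1]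
            by_cases h2 : ch = '>'
            · rw [if_pos h2, if_pos h2]
            · rw [if_neg h2, if_neg h2]
              exact ih g none (i + 1) (by omega) (by omega) (by omega)

-- A's quote scan reaches -1 when no closing quote exists at or after i
theorem pvA_noclose (cs : List Char) (q : Char) : ∀ (f : Nat) (i : Int), 0 ≤ i →
    (∀ m : Nat, (hm : m < cs.length) → i ≤ (m : Int) → cs[m] ≠ q) →
    pvScanAF cs f (some q) i = -1 := by
  intro f
  induction f with
  | zero => intro i _ _; rfl
  | succ f ih =>
    intro i hi hno
    cases h : PySem.List.pyGet? cs i with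
    | none => exact pvA_step_none f _ h
    | some ch =>
      obtain ⟨hlt, hch⟩ := pv_get_pos hi h
      have hne : ch ≠ q := by
        intro he; exact hno i.toNat hlt (by omega) (by rw [hch, he])
      rw [pvA_step_quote f h, if_neg hne]
      exact ih (i + 1) (by omega) (fun m hm him => hno m hm (by omega))

-- A's quote scan jumps to the first closing quote j and resumes unquoted at j+1
theorem pvA_close (cs : List Char) (q : Char) : ∀ (f : Nat) (i : Int) (j : Nat) (g : Nat),
    0 ≤ i → (hj : j < cs.length) → i ≤ (j : Int) →
    ((cs.length : Int) - i).toNat < f → ((cs.length : Int) - ((j : Int) + 1)).toNat < g →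
    cs[j] = q →
    (∀ m : Nat, (hm : m < cs.length) → i ≤ (m : Int) → m < j → cs[m] ≠ q) →
    pvScanAF cs f (some q) i = pvScanAF cs g none ((j : Int) + 1) := by
  intro f
  induction f with
  | zero => intro i j g _ _ _ hf _ _ _; exact absurd hf (Nat.not_lt_zero _)
  | succ f ih =>
    intro i j g hi hj hij hf hg hq hmin
    by_cases hcase : i = (j : Int)
    · have hij' : j = i.toNat := by omega
      subst hij'
      have h : PySem.List.pyGet? cs i = some q := by
        rw [PySem.List.pyGet?_eq_some_getElem cs hi (show i < (cs.length : Int) by omega), hq]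
      rw [pvA_step_quote f h, if_pos rfl, show ((i.toNat : Int) + 1) = i + 1 from by omega]
      exact pvA_fuel cs f g none (i + 1) (by omega) (by omega) (by omega)
    · have h : PySem.List.pyGet? cs i = some (cs[i.toNat]'(by omega)) :=
        PySem.List.pyGet?_eq_some_getElem cs hi (by omega)
      have hne : cs[i.toNat]'(by omega) ≠ q := hmin i.toNat (by omega) (by omega) (by omega)
      rw [pvA_step_quote f h, if_neg hne]
      exact ih (i + 1) j g (by omega) hj (by omega) (by omega) hg hq
        (fun m hm him hmj => hmin m hm (by omega) hmj)

-- a singleton is an infix as soon as its element is a member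
theorem pv_singleton_infix {a : Char} {l : List Char} (hm : a ∈ l) : [a] <:+: l := by
  obtain ⟨s, t, rfl⟩ := List.append_of_mem hm
  exact ⟨s, t, by simp⟩

-- "special" characters: the ones B searches for
def pvSpec (c : Char) : Prop := c = '>' ∨ c = '"' ∨ c = '\''

-- findFrom with a start at or past the end finds nothing (nonempty needle)
theorem pv_findFrom_past (cs : List Char) (c : Char) (i : Int)
    (h : (cs.length : Int) ≤ i) : PySem.Chars.findFrom cs [c] i none = -1 := by
  simp [PySem.Chars.findFrom]
  intro h1 h2
  exfalso
  have hn : ¬ i < 0 := by omega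
  rw [if_neg hn] at h1 h2
  have he : i = (cs.length : Int) := by omega
  subst he
  rw [List.drop_eq_nil_iff.2 (by omega)] at h2
  simp [PySem.Chars.find, PySem.Chars.find.go] at h2

-- an occurrence of c at m ≥ i makes findFrom succeed with a result ≤ m
theorem pv_occ_find (cs : List Char) (c : Char) (i : Int) (m : Nat)
    (hi : 0 ≤ i) (hm : m < cs.length) (him : i ≤ (m : Int)) (hc : cs[m] = c) :
    PySem.Chars.findFrom cs [c] i none ≠ -1 ∧
      i ≤ PySem.Chars.findFrom cs [c] i none ∧
      PySem.Chars.findFrom cs [c] i none ≤ (m : Int) := by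
  have hic : i = ((i.toNat : Nat) : Int) := by omega
  have hkle : i.toNat ≤ cs.length := by omega
  rw [hic]
  have hne : PySem.Chars.findFrom cs [c] ((i.toNat : Nat) : Int) none ≠ -1 := by
    rw [Ne, PySem.Chars.findFrom_natCast_eq_neg_one_iff cs [c] i.toNat hkle]
    intro hno
    refine hno (pv_singleton_infix ?_)
    have hme : (cs.drop i.toNat)[m - i.toNat]'(by rw [List.length_drop]; omega) = cs[m]'hm := by
      rw [List.getElem_drop]; congr 1; omega
    rw [← hc, ← hme]
    exact List.getElem_mem _
  obtain ⟨hge, _, hmin⟩ := PySem.Chars.findFrom_natCast_spec cs [c] i.toNat hkle hne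
  refine ⟨hne, by omega, ?_⟩
  by_contra hgt
  have hlt : m < (PySem.Chars.findFrom cs [c] ((i.toNat : Nat) : Int) none).toNat := by omega
  exact hmin m (by omega) hlt ⟨cs.drop (m + 1), by
    rw [List.singleton_append, ← hc]; exact (List.drop_eq_getElem_cons hm).symm⟩

-- membership in the candidate list
theorem pv_cands_mem {cs : List Char} {i p : Int} :
    p ∈ pvCandsB cs i ↔
      ∃ c, (c = '>' ∨ c = '"' ∨ c = '\'') ∧
        PySem.Chars.findFrom cs [c] i none = p ∧ p ≠ -1 := by
  simp only [pvCandsB, List.mem_filter, List.mem_map, List.mem_cons, List.not_mem_nil, or_false,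
    bne_iff_ne, ne_eq]
  constructor
  · rintro ⟨⟨c, hc, hf⟩, hp⟩
    exact ⟨c, hc, hf, hp⟩
  · rintro ⟨c, hc, hf, hp⟩
    exact ⟨⟨c, hc, hf⟩, hp⟩

-- A, scanning unquoted, returns -1 when no special character remains
theorem pvA_nospecial (cs : List Char) : ∀ (f : Nat) (i : Int), 0 ≤ i →
    (∀ m : Nat, (hm : m < cs.length) → i ≤ (m : Int) → ¬ pvSpec cs[m]) →
    pvScanAF cs f none i = -1 := by
  intro f
  induction f with
  | zero => intro i _ _; rfl
  | succ f ih =>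
    intro i hi hno
    cases h : PySem.List.pyGet? cs i with
    | none => exact pvA_step_none f _ h
    | some ch =>
      obtain ⟨hlt, hch⟩ := pv_get_pos hi h
      have hns : ¬ pvSpec ch := by
        intro hs; exact hno i.toNat hlt (by omega) (by rw [hch]; exact hs)
      rw [pvA_step_open f h, if_neg (by intro h1; exact hns (by unfold pvSpec; tauto)),
        if_neg (by intro h2; exact hns (Or.inl h2))]
      exact ih (i + 1) (by omega) (fun m hm him => hno m hm (by omega))

-- A, scanning unquoted, may jump ahead over non-special characters
theorem pvA_advance (cs : List Char) : ∀ (f : Nat) (g : Nat) (i j : Int),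
    0 ≤ i → i ≤ j → j ≤ (cs.length : Int) →
    ((cs.length : Int) - i).toNat < f → ((cs.length : Int) - j).toNat < g →
    (∀ m : Nat, (hm : m < cs.length) → i ≤ (m : Int) → (m : Int) < j → ¬ pvSpec cs[m]) →
    pvScanAF cs f none i = pvScanAF cs g none j := by
  intro f
  induction f with
  | zero => intro g i j _ _ _ hf _ _; exact absurd hf (Nat.not_lt_zero _)
  | succ f ih =>
    intro g i j hi hij hjl hf hg hno
    by_cases hcase : i = j
    · subst hcase; exact pvA_fuel cs (f + 1) g none i hi hf hg
    · have hilt : i < (cs.length : Int) := by omega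
      have h : PySem.List.pyGet? cs i = some (cs[i.toNat]'(by omega)) :=
        PySem.List.pyGet?_eq_some_getElem cs hi (by omega)
      have hns : ¬ pvSpec (cs[i.toNat]'(by omega)) :=
        hno i.toNat (by omega) (by omega) (by omega)
      rw [pvA_step_open f h, if_neg (by intro h1; exact hns (by unfold pvSpec; tauto)),
        if_neg (by intro h2; exact hns (Or.inl h2))]
      exact ih g (i + 1) j (by omega) (by omega) hjl (by omega) hg
        (fun m hm him hmj => hno m hm (by omega) hmj)

-- main loop equivalence on nonnegative indices
theorem pv_main (cs : List Char) : ∀ (fB fA : Nat) (i : Int), 0 ≤ i →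
    ((cs.length : Int) - i).toNat < fA → ((cs.length : Int) - i).toNat < fB →
    pvScanAF cs fA none i = pvScanBF cs fB i := by
  intro fB
  induction fB with
  | zero => intro fA i _ _ hB; exact absurd hB (Nat.not_lt_zero _)
  | succ fB ih =>
    intro fA i hi hA hB
    cases hmin : PySem.List.min? (pvCandsB cs i) (fun x => x) with
    | none =>
      -- no special character at or after i: both sides give -1
      rw [pvB_step_none fB hmin]
      have hempty : pvCandsB cs i = [] := (PySem.List.min?_eq_none_iff _ _).1 hmin
      refine pvA_nospecial cs fA i hi ?_
      intro m hm him hs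
      have hc : ∃ c, (c = '>' ∨ c = '"' ∨ c = '\'') ∧ cs[m] = c := by
        rcases hs with h1 | h1 | h1
        · exact ⟨'>', Or.inl rfl, h1⟩
        · exact ⟨'"', Or.inr (Or.inl rfl), h1⟩
        · exact ⟨'\'', Or.inr (Or.inr rfl), h1⟩
      obtain ⟨c, hc3, hcm⟩ := hc
      obtain ⟨hne, _, _⟩ := pv_occ_find cs c i m hi hm him hcm
      have hmem : PySem.Chars.findFrom cs [c] i none ∈ pvCandsB cs i :=
        pv_cands_mem.2 ⟨c, hc3, rfl, hne⟩
      rw [hempty] at hmem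
      cases hmem
    | some j =>
      -- j = the first special position at or after i
      have hjmem := PySem.List.min?_mem hmin
      have hjmin := PySem.List.min?_isMin hmin
      obtain ⟨c, hc3, hfc, hjne⟩ := pv_cands_mem.1 hjmem
      have hic : i = ((i.toNat : Nat) : Int) := by omega
      have hkle : i.toNat ≤ cs.length := by
        by_contra hcon
        rw [pv_findFrom_past cs c i (by omega)] at hfc
        exact hjne hfc.symm
      have hfc' : PySem.Chars.findFrom cs [c] ((i.toNat : Nat) : Int) none = j := by
        rw [← hic]; exact hfc
      obtain ⟨hge, hpre, _⟩ :=
        PySem.Chars.findFrom_natCast_spec cs [c] i.toNat hkle (by rw [hfc']; exact hjne)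
      rw [hfc'] at hge hpre
      have hj0 : 0 ≤ j := by omega
      obtain ⟨t, ht⟩ := hpre
      have hdropne : cs.drop j.toNat ≠ [] := by
        intro hnil; rw [hnil] at ht; cases ht
      have hjlt : j.toNat < cs.length := by
        by_contra hcon
        exact hdropne (List.drop_eq_nil_iff.2 (by omega))
      have hjq : cs[j.toNat] = c := by
        rw [List.singleton_append, List.drop_eq_getElem_cons hjlt] at ht
        injection ht with h3 _
        exact h3.symm
      -- nothing special strictly before j
      have hnospec : ∀ m : Nat, (hm : m < cs.length) → i ≤ (m : Int) → (m : Int) < j →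
          ¬ pvSpec cs[m] := by
        intro m hm him hmj hs
        have hc' : ∃ c', (c' = '>' ∨ c' = '"' ∨ c' = '\'') ∧ cs[m] = c' := by
          rcases hs with h1 | h1 | h1
          · exact ⟨'>', Or.inl rfl, h1⟩
          · exact ⟨'"', Or.inr (Or.inl rfl), h1⟩
          · exact ⟨'\'', Or.inr (Or.inr rfl), h1⟩
        obtain ⟨c', hc3', hcm'⟩ := hc'
        obtain ⟨hne', _, hle'⟩ := pv_occ_find cs c' i m hi hm him hcm'
        have hmem' : PySem.Chars.findFrom cs [c'] i none ∈ pvCandsB cs i :=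
          pv_cands_mem.2 ⟨c', hc3', rfl, hne'⟩
        have := hjmin _ hmem'
        simp only at this
        omega
      -- A advances from i to j (one unfolding step still available at j)
      cases fA with
      | zero => exact absurd hA (Nat.not_lt_zero _)
      | succ fA' =>
        have hadv := pvA_advance cs (fA' + 1) (fA' + 1) i j hi (by omega) (by omega)
          hA (by omega) hnospec
        have hgetj : PySem.List.pyGet? cs j = some c := by
          rw [PySem.List.pyGet?_eq_some_getElem cs hj0 (by omega), hjq]
        rw [hadv, pvB_step_some fB hmin hgetj]
        rcases hc3 with hgt | hq
        · -- c = '>' : both return j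
          subst hgt
          rw [pvA_step_open fA' hgetj, if_neg (by simp), if_pos rfl, if_pos rfl]
        · -- c is a quote: A enters quote state, B skips with findFrom
          have hquote : c = '"' ∨ c = '\'' := hq
          have hcne : ¬ c = '>' := by rcases hquote with h | h <;> simp [h]
          rw [pvA_step_open fA' hgetj, if_pos hquote, if_neg hcne]
          by_cases hfind : PySem.Chars.findFrom cs [c] (j + 1) none = -1
          · rw [if_pos hfind]
            have hk1 : j + 1 = ((j.toNat + 1 : Nat) : Int) := by omega
            have hkle1 : j.toNat + 1 ≤ cs.length := by omega
            rw [hk1] at hfind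
            have hno := (PySem.Chars.findFrom_natCast_eq_neg_one_iff cs [c] (j.toNat + 1) hkle1).1 hfind
            refine pvA_noclose cs c fA' (j + 1) (by omega) ?_
            intro m hm him he
            refine hno (pv_singleton_infix ?_)
            have hmk : j.toNat + 1 ≤ m := by omega
            have hme : (cs.drop (j.toNat + 1))[m - (j.toNat + 1)]'(by rw [List.length_drop]; omega) = cs[m]'hm := by
              rw [List.getElem_drop]; congr 1; omega
            rw [← he, ← hme]
            exact List.getElem_mem _
          · rw [if_neg hfind]
            have hk1 : j + 1 = ((j.toNat + 1 : Nat) : Int) := by omega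
            have hkle1 : j.toNat + 1 ≤ cs.length := by omega
            rw [hk1] at hfind
            obtain ⟨hge2, hpre2, hmin2⟩ :=
              PySem.Chars.findFrom_natCast_spec cs [c] (j.toNat + 1) hkle1 hfind
            set k : Int := PySem.Chars.findFrom cs [c] ((j.toNat + 1 : Nat) : Int) none with hkdef
            have hk0 : 0 ≤ k := by omega
            obtain ⟨t2, ht2⟩ := hpre2
            have hdropne2 : cs.drop k.toNat ≠ [] := by
              intro hnil; rw [hnil] at ht2; cases ht2
            have hklt : k.toNat < cs.length := by
              by_contra hcon
              exact hdropne2 (List.drop_eq_nil_iff.2 (by omega))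
            have hkq : cs[k.toNat] = c := by
              rw [List.singleton_append, List.drop_eq_getElem_cons hklt] at ht2
              injection ht2 with h3 _
              exact h3.symm
            have hstep := pvA_close cs c fA' (j + 1) k.toNat fA' (by omega) hklt (by omega)
              (by omega) (by omega) hkq ?_
            · have hkk : PySem.Chars.findFrom cs [c] (j + 1) none = k := by rw [hk1]
              rw [hstep, hkk, show ((k.toNat : Int) + 1) = k + 1 from by omega]
              exact ih fA' (k + 1) (by omega) (by omega) (by omega)
            · intro m hm him hmk he
              refine hmin2 m (by omega) hmk ⟨cs.drop (m + 1), ?_⟩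
              rw [List.singleton_append, ← he]
              exact (List.drop_eq_getElem_cons hm).symm

-- ===== VERDICT (by name: the statement is the Claim_ definition above) =====
theorem find_tag_open_end_py_spec : Claim_equal_find_tag_open_end_py := by
  intro source start_index _ hpre
  unfold Spec_find_tag_open_end_py find_tag_open_end_py find_tag_open_end_py_alt
  exact pv_main source.toList
    (((source.toList.length : Int) - start_index).toNat + 1)
    (((source.toList.length : Int) - start_index).toNat + 1)
    start_index hpre (by omega) (by omega)
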